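-- pv_equiv track=rewrite | github.com/arin17bishwa/myCP_sols | CC/COLGLF4.py | func
-- ===== SOURCE A (Python) =====
-- def func(n,e,h,a,b,c):
--     if n>e and n>h:
--         return pow(10,18)
--
--     ans=pow(10,18)
--     l1=1
--
--     if e>=2*n:
--         ans=min(ans,n*a)
--     if h>=3*n:
--         ans=min(ans,n*b)
--
--     if e>=n and h>=n:
--         ans=min(ans,n*c)
--
--     if (e//2>=1) and ((n-e//2)*3 <= h):
--         if a<b:
--             x = min(n-1, e//2)
--         else:
--             x = max(l1, n - h//3)
--
--         y = (a-b) * x + b * n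
--         ans = min(ans, y)
--
--     if (e>n) and ((e + h) >= (2*n)):
--         if a<c:
--             x = min(n-1, e-n)
--         else :
--             x = max(l1, n-h)
--
--         y = (a-c) * x + n * c
--         ans = min(ans, y)
--
--     if ((h-n)//2)>=(n-e) and ((h-n)//2)>0:
--         if b<c:
--             x = min(n - 1, (h - n)//2)
--         else:
--             x = max(l1, n - e)
--
--         y=(b-c)*x + n*c
--         ans=min(ans,y)
--
--     if n>2 and h>3 and e>2:
--         ans=min(ans,a+b+c+func(n-3, e-3, h-4, a, b, c))
--
--     return ans
-- ===== SOURCE B (Python) =====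
-- INF = 10 ** 18
--
--
-- def _local(cn, ce, ch, a, b, c):
--     # branch-minimum at one level of the recursion (INF if the level is infeasible)
--     if cn > ce and cn > ch:
--         return INF
--     best = INF
--     if ce >= 2 * cn:
--         best = min(best, cn * a)
--     if ch >= 3 * cn:
--         best = min(best, cn * b)
--     if ce >= cn and ch >= cn:
--         best = min(best, cn * c)
--     if ce // 2 >= 1 and (cn - ce // 2) * 3 <= ch:
--         x = min(cn - 1, ce // 2) if a < b else max(1, cn - ch // 3)
--         best = min(best, (a - b) * x + b * cn)
--     if ce > cn and ce + ch >= 2 * cn: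
--         x = min(cn - 1, ce - cn) if a < c else max(1, cn - ch)
--         best = min(best, (a - c) * x + cn * c)
--     if (ch - cn) // 2 >= cn - ce and (ch - cn) // 2 > 0:
--         x = min(cn - 1, (ch - cn) // 2) if b < c else max(1, cn - ce)
--         best = min(best, (b - c) * x + cn * c)
--     return best
--
--
-- def func(n, e, h, a, b, c):
--     # iterative unrolling of the recursion: answer = min over depths k of
--     # k*(a+b+c) + local minimum at state (n-3k, e-3k, h-4k)
--     cn, ce, ch, acc = n, e, h, 0
--     best = _local(cn, ce, ch, a, b, c)
--     while (cn <= ce or cn <= ch) and cn > 2 and ch > 3 and ce > 2: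
--         acc += a + b + c
--         cn, ce, ch = cn - 3, ce - 3, ch - 4
--         best = min(best, acc + _local(cn, ce, ch, a, b, c))
--     return best
-- ===== Notes on version B (the rewrite author's own statement) =====
-- stated objective: alternative
-- what changed: Replaces A's self-recursion with an explicit while loop over the chain of states (n-3k, e-3k, h-4k), keeping a cost accumulator and a running minimum, with the per-level branch minimum factored into a helper.
import Mathlib
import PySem

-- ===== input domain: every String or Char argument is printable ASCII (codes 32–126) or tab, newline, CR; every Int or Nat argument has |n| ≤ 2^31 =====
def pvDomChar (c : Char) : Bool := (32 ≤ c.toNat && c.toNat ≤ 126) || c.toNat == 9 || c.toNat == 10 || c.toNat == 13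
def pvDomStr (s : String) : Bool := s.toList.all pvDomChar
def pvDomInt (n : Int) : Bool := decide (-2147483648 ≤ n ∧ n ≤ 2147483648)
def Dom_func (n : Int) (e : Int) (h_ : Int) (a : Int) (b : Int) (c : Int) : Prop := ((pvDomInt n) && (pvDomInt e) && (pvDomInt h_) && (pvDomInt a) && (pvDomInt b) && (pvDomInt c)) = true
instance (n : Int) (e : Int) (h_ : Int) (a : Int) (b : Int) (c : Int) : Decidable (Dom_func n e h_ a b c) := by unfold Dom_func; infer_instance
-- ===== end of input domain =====

-- B replaces A's self-recursion by an explicit loop over the chain of states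
-- (n-3k, e-3k, h-4k) with a running cost accumulator (alternative decomposition).

-- ===== PORT A =====
def func (n : Int) (e : Int) (h_ : Int) (a : Int) (b : Int) (c : Int) : Int :=
  if n > e ∧ n > h_ then 10 ^ 18
  else
    let ans : Int :=
      (let ans : Int := 10 ^ 18
       let ans := if e ≥ 2 * n then min ans (n * a) else ans
       let ans := if h_ ≥ 3 * n then min ans (n * b) else ans
       let ans := if e ≥ n ∧ h_ ≥ n then min ans (n * c) else ans
       let ans :=
         if PySem.Int.floordiv e 2 ≥ 1 ∧ (n - PySem.Int.floordiv e 2) * 3 ≤ h_ then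
           let x := if a < b then min (n - 1) (PySem.Int.floordiv e 2)
                    else max 1 (n - PySem.Int.floordiv h_ 3)
           min ans ((a - b) * x + b * n)
         else ans
       let ans :=
         if e > n ∧ e + h_ ≥ 2 * n then
           let x := if a < c then min (n - 1) (e - n) else max 1 (n - h_)
           min ans ((a - c) * x + n * c)
         else ans
       let ans :=
         if PySem.Int.floordiv (h_ - n) 2 ≥ n - e ∧ PySem.Int.floordiv (h_ - n) 2 > 0 then
           let x := if b < c then min (n - 1) (PySem.Int.floordiv (h_ - n) 2)
                    else max 1 (n - e)
           min ans ((b - c) * x + n * c)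
         else ans
       ans)
    if n > 2 ∧ h_ > 3 ∧ e > 2 then
      min ans (a + b + c + func (n - 3) (e - 3) (h_ - 4) a b c)
    else ans
termination_by n.toNat
decreasing_by omega

-- ===== PORT B =====
-- Source B's _local: branch-minimum at one level (10^18 if the level is infeasible)
def pvLocal (cn : Int) (ce : Int) (ch : Int) (a : Int) (b : Int) (c : Int) : Int :=
  if cn > ce ∧ cn > ch then 10 ^ 18
  else
    let best : Int := 10 ^ 18
    let best := if ce ≥ 2 * cn then min best (cn * a) else best
    let best := if ch ≥ 3 * cn then min best (cn * b) else best
    let best := if ce ≥ cn ∧ ch ≥ cn then min best (cn * c) else best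
    let best :=
      if PySem.Int.floordiv ce 2 ≥ 1 ∧ (cn - PySem.Int.floordiv ce 2) * 3 ≤ ch then
        let x := if a < b then min (cn - 1) (PySem.Int.floordiv ce 2)
                 else max 1 (cn - PySem.Int.floordiv ch 3)
        min best ((a - b) * x + b * cn)
      else best
    let best :=
      if ce > cn ∧ ce + ch ≥ 2 * cn then
        let x := if a < c then min (cn - 1) (ce - cn) else max 1 (cn - ch)
        min best ((a - c) * x + cn * c)
      else best
    let best :=
      if PySem.Int.floordiv (ch - cn) 2 ≥ cn - ce ∧ PySem.Int.floordiv (ch - cn) 2 > 0 then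
        let x := if b < c then min (cn - 1) (PySem.Int.floordiv (ch - cn) 2)
                 else max 1 (cn - ce)
        min best ((b - c) * x + cn * c)
      else best
    best

-- Source B's while loop, state = (cn, ce, ch, acc, best)
def pvLoop (cn : Int) (ce : Int) (ch : Int) (a : Int) (b : Int) (c : Int)
    (acc : Int) (best : Int) : Int :=
  if (cn ≤ ce ∨ cn ≤ ch) ∧ cn > 2 ∧ ch > 3 ∧ ce > 2 then
    pvLoop (cn - 3) (ce - 3) (ch - 4) a b c (acc + (a + b + c))
      (min best (acc + (a + b + c) + pvLocal (cn - 3) (ce - 3) (ch - 4) a b c))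
  else best
termination_by cn.toNat
decreasing_by omega

def func_alt (n : Int) (e : Int) (h_ : Int) (a : Int) (b : Int) (c : Int) : Int :=
  pvLoop n e h_ a b c 0 (pvLocal n e h_ a b c)

-- ===== PRECONDITION & SPEC =====
def Spec_func (n : Int) (e : Int) (h_ : Int) (a : Int) (b : Int) (c : Int) (out : Int) : Prop := out = func_alt n e h_ a b c
instance (n : Int) (e : Int) (h_ : Int) (a : Int) (b : Int) (c : Int) (out : Int) : Decidable (Spec_func n e h_ a b c out) := by unfold Spec_func; infer_instance

-- ===== CLAIM (what is proved, stated in full; the proofs are below) =====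
def Claim_equal_func : Prop := ∀ (n : Int) (e : Int) (h_ : Int) (a : Int) (b : Int) (c : Int), Dom_func n e h_ a b c → Spec_func n e h_ a b c (func n e h_ a b c)

-- ===== LEMMAS AND PROOFS =====

-- zeta: pull a bound chain out of the final if
lemma pv_let_if (P : Prop) [Decidable P] (C R : Int) :
    (let ans := C; if P then min ans R else ans) = if P then min C R else C := rfl

-- A's body, re-expressed through pvLocal: the non-recursive part of a level is pvLocal.
lemma func_eq_local (n e h_ a b c : Int) :
    func n e h_ a b c =
      if ¬(n > e ∧ n > h_) ∧ n > 2 ∧ h_ > 3 ∧ e > 2 then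
        min (pvLocal n e h_ a b c) (a + b + c + func (n - 3) (e - 3) (h_ - 4) a b c)
      else pvLocal n e h_ a b c := by
  by_cases hg : n > e ∧ n > h_
  · conv_lhs => rw [func]
    rw [if_pos hg,
        if_neg (show ¬(¬(n > e ∧ n > h_) ∧ n > 2 ∧ h_ > 3 ∧ e > 2) from fun h => h.1 hg),
        pvLocal, if_pos hg]
  · conv_lhs => rw [func]
    rw [if_neg hg, pv_let_if]
    conv_rhs => rw [pvLocal]
    rw [if_neg hg]
    by_cases hr : n > 2 ∧ h_ > 3 ∧ e > 2
    · rw [if_pos hr, if_pos (show (¬(n > e ∧ n > h_)) ∧ n > 2 ∧ h_ > 3 ∧ e > 2 from ⟨hg, hr⟩)]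
    · rw [if_neg hr, if_neg (show ¬((¬(n > e ∧ n > h_)) ∧ n > 2 ∧ h_ > 3 ∧ e > 2) from fun h => hr h.2)]

lemma func_le_local (n e h_ a b c : Int) :
    func n e h_ a b c ≤ pvLocal n e h_ a b c := by
  rw [func_eq_local]
  split_ifs
  · exact min_le_left _ _
  · exact le_refl _

-- loop invariant
lemma pvLoop_eq (k : Nat) : ∀ (cn ce ch a b c acc best : Int), cn.toNat ≤ k →
    pvLoop cn ce ch a b c acc (min best (acc + pvLocal cn ce ch a b c)) =
      min best (acc + func cn ce ch a b c) := by
  induction k with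
  | zero =>
    intro cn ce ch a b c acc best hk
    rw [pvLoop, func_eq_local]
    have : ¬((cn ≤ ce ∨ cn ≤ ch) ∧ cn > 2 ∧ ch > 3 ∧ ce > 2) := by omega
    rw [if_neg this]
    have : ¬(¬(cn > ce ∧ cn > ch) ∧ cn > 2 ∧ ch > 3 ∧ ce > 2) := by omega
    rw [if_neg this]
  | succ k ih =>
    intro cn ce ch a b c acc best hk
    rw [pvLoop, func_eq_local]
    by_cases hc : (cn ≤ ce ∨ cn ≤ ch) ∧ cn > 2 ∧ ch > 3 ∧ ce > 2
    · rw [if_pos hc]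
      have hk' : (cn - 3).toNat ≤ k := by omega
      rw [ih (cn - 3) (ce - 3) (ch - 4) a b c (acc + (a + b + c))
            (min best (acc + pvLocal cn ce ch a b c)) hk']
      have hd : ¬(cn > ce ∧ cn > ch) ∧ cn > 2 ∧ ch > 3 ∧ ce > 2 := by omega
      rw [if_pos hd]
      generalize pvLocal cn ce ch a b c = L
      generalize func (cn - 3) (ce - 3) (ch - 4) a b c = F
      omega
    · rw [if_neg hc]
      have : ¬(¬(cn > ce ∧ cn > ch) ∧ cn > 2 ∧ ch > 3 ∧ ce > 2) := by omega
      rw [if_neg this]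

-- ===== VERDICT (by name: the statement is the Claim_ definition above) =====
theorem func_spec : Claim_equal_func := by
  intro n e h_ a b c _
  unfold Spec_func func_alt
  have h1 := pvLoop_eq n.toNat n e h_ a b c 0 (pvLocal n e h_ a b c) (le_refl _)
  have h2 : min (pvLocal n e h_ a b c) ((0:Int) + pvLocal n e h_ a b c)
      = pvLocal n e h_ a b c := by simp
  rw [h2] at h1
  rw [h1, zero_add]
  exact (min_eq_right (func_le_local n e h_ a b c)).symm
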